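-- pv_equiv track=rewrite | github.com/mrwillo/python-microservices | microservices/app.py | get_end_index_for_payload
-- ===== SOURCE A (Python) =====
-- def get_end_index_for_payload(start_index, window_length, context):
--     end_index = start_index
--     length_of_context = len(context)
--     for idx in range(start_index, start_index + window_length):
--         if idx >= length_of_context or context[idx] in ['\\n', '\n']:
--             return end_index
--         end_index = idx
--     return end_index
-- ===== SOURCE B (Python) =====
-- def get_end_index_for_payload(start_index, window_length, context):
--     limit = max(start_index, min(start_index + window_length, len(context)))
--     p = context.find('\n', start_index, limit)
--     return max(start_index, (p if p != -1 else limit) - 1)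
-- ===== Notes on version B (the rewrite author's own statement) =====
-- stated objective: simpler
-- what changed: Drops the index loop and accumulator: B computes the window boundary limit arithmetically and makes one str.find('\n', start, limit) call, returning max(start_index, (p if found else limit) - 1).
-- outside the precondition, e.g. on get_end_index_for_payload(-3, 2, 'a\nb'): A returns -3, B returns 0; on get_end_index_for_payload(-2, 2, 'abc'): A returns -1, B returns -1
import Mathlib
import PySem

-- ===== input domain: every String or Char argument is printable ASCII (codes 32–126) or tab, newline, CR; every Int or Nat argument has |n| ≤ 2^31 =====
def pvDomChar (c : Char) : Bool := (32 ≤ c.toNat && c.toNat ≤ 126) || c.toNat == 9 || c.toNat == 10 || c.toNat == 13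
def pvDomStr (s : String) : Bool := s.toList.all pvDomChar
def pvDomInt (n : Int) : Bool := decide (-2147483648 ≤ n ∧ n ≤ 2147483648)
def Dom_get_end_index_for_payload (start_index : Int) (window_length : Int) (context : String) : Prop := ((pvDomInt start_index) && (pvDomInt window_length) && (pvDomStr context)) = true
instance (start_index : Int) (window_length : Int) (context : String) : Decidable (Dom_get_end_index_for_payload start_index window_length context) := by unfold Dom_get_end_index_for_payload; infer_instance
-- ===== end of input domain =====

-- B replaces A's per-character window scan by arithmetic on the window boundary plus one bounded
-- find call (objective: simpler); equivalence is claimed for 0 ≤ start_index (see Pre_ below).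

-- ===== PORT A =====
-- loop 'for idx in range(start_index, start_index + window_length)' with early return;
-- Python's range is lazy, so the loop is recursion on idx bounded by the range's stop value
def pvALoop (context : String) (length_of_context : Int) (idx stop : Int) (end_index : Int) : Int :=
  if idx < stop then
    if length_of_context ≤ idx then end_index
    else
      match PySem.Str.pyGet? context idx with
      | none => end_index   -- IndexError in Python (idx < -len(context)); outside Pre_
      | some c =>
        -- context[idx] in ['\\n', '\n'] : the two-character literal '\\n' can never equal a
        -- one-character string, matching Python, where that branch is dead
        if [c] = ['\\', 'n'] ∨ [c] = ['\n'] then end_index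
        else pvALoop context length_of_context (idx + 1) stop idx
  else end_index
termination_by (stop - idx).toNat
decreasing_by omega

def get_end_index_for_payload (start_index : Int) (window_length : Int) (context : String) : Int :=
  pvALoop context (PySem.Str.len context) start_index (start_index + window_length) start_index

-- ===== PORT B =====
def get_end_index_for_payload_alt (start_index : Int) (window_length : Int) (context : String) : Int :=
  let limit := max start_index (min (start_index + window_length) (PySem.Str.len context))
  let p := PySem.Str.findFrom context "\n" start_index (some limit)
  max start_index ((if p ≠ -1 then p else limit) - 1)

-- ===== PRECONDITION & SPEC =====
-- Pre_ excludes negative start_index with a nonempty window: there A either raises IndexError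
-- (start_index < -len(context)) or reads characters through Python's negative-index wraparound, an
-- accident of the implementation on a corner outside this payload-windowing helper's domain, where
-- B's clamped bounded search is an equally defensible value.
def Pre_get_end_index_for_payload (start_index : Int) (window_length : Int) (context : String) : Prop :=
  0 ≤ start_index ∨ window_length < 1
instance (start_index : Int) (window_length : Int) (context : String) : Decidable (Pre_get_end_index_for_payload start_index window_length context) := by unfold Pre_get_end_index_for_payload; infer_instance

def pvWitness_get_end_index_for_payload : Int × Int × String := (0, 3, "ab")

def Spec_get_end_index_for_payload (start_index : Int) (window_length : Int) (context : String) (out : Int) : Prop := out = get_end_index_for_payload_alt start_index window_length context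
instance (start_index : Int) (window_length : Int) (context : String) (out : Int) : Decidable (Spec_get_end_index_for_payload start_index window_length context out) := by unfold Spec_get_end_index_for_payload; infer_instance

-- ===== CLAIM (what is proved, stated in full; the proofs are below) =====
def Claim_equal_get_end_index_for_payload : Prop := ∀ (start_index : Int) (window_length : Int) (context : String), Dom_get_end_index_for_payload start_index window_length context → Pre_get_end_index_for_payload start_index window_length context → Spec_get_end_index_for_payload start_index window_length context (get_end_index_for_payload start_index window_length context)

-- ===== LEMMAS AND PROOFS =====

-- the index at which A's loop stops: first idx in [s, e) with idx ≥ len or cs[idx] = '\n', else e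
def pvStop (cs : List Char) (s e : Int) : Int :=
  if h : s < e then
    if ((cs.length : Int) ≤ s ∨ cs[s.toNat]? = some '\n') then s
    else pvStop cs (s + 1) e
  else e
termination_by (e - s).toNat
decreasing_by omega

lemma pvStop_ge (cs : List Char) (s e : Int) (h : s ≤ e) : s ≤ pvStop cs s e := by
  obtain ⟨k, hk⟩ : ∃ k : Nat, e - s = k := ⟨(e - s).toNat, by omega⟩
  induction k generalizing s with
  | zero => rw [pvStop, dif_neg (by omega : ¬ s < e)]; omega
  | succ k ih =>
    rw [pvStop, dif_pos (by omega : s < e)]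
    split
    · omega
    · have := ih (s + 1) (by omega) (by omega); omega

lemma pvStop_congr (cs : List Char) (s m e : Int) (hsm : s ≤ m) (hme : m ≤ e)
    (hno : ∀ i, s ≤ i → i < m → ¬(((cs.length : Int) ≤ i ∨ cs[i.toNat]? = some '\n'))) :
    pvStop cs s e = pvStop cs m e := by
  obtain ⟨k, hk⟩ : ∃ k : Nat, m - s = k := ⟨(m - s).toNat, by omega⟩
  induction k generalizing s with
  | zero =>
    have hseq : s = m := by omega
    subst hseq
    rfl
  | succ k ih =>
    rw [pvStop, dif_pos (by omega : s < e), if_neg (hno s le_rfl (by omega))]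
    exact ih (s + 1) (by omega) (fun i h1 h2 => hno i (by omega) h2) (by omega)

lemma pv_singleton_prefix_iff (c : Char) (l : List Char) : [c] <+: l ↔ l.head? = some c := by
  constructor
  · rintro ⟨t, rfl⟩; rfl
  · intro h
    cases l with
    | nil => simp at h
    | cons x xs => simp only [List.head?_cons, Option.some.injEq] at h; exact ⟨xs, by simp [h]⟩

-- A's loop over the range list equals its stop characterisation
lemma pv_loop_eq_stop (context : String) (s e acc : Int) (hs : 0 ≤ s) :
    pvALoop context ((context.toList.length : Int)) s e acc
      = if pvStop context.toList s e ≤ s then acc else pvStop context.toList s e - 1 := by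
  obtain ⟨k, hk⟩ : ∃ k : Nat, (e - s).toNat = k := ⟨_, rfl⟩
  induction k generalizing s acc with
  | zero =>
    have he : e ≤ s := by omega
    rw [pvStop, dif_neg (by omega : ¬ s < e)]
    rw [pvALoop, if_neg (by omega : ¬ s < e), if_pos (by omega : e ≤ s)]
  | succ k ih =>
    have hse : s < e := by omega
    rw [pvALoop, if_pos hse]
    by_cases hL : (context.toList.length : Int) ≤ s
    · have hstop : pvStop context.toList s e = s := by
        rw [pvStop, dif_pos hse, if_pos (Or.inl hL)]
      rw [if_pos hL, hstop, if_pos le_rfl]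
    · have hlt : s.toNat < context.toList.length := by omega
      have hget : PySem.Str.pyGet? context s = context.toList[s.toNat]? := by
        rw [PySem.Str.pyGet?_eq, PySem.Chars.pyGet?_eq_listPyGet?, PySem.List.pyGet?_of_nonneg _ hs]
      obtain ⟨c, hc⟩ : ∃ c, context.toList[s.toNat]? = some c :=
        ⟨context.toList[s.toNat], List.getElem?_eq_getElem hlt⟩
      by_cases hnl : c = '\n'
      · have hstop : pvStop context.toList s e = s := by
          rw [pvStop, dif_pos hse, if_pos (Or.inr (by rw [hc, hnl]))]
        rw [if_neg hL, hget, hc]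
        dsimp only
        rw [if_pos (Or.inr (by rw [hnl])), hstop, if_pos le_rfl]
      · have hcond : ¬ ((context.toList.length : Int) ≤ s ∨ context.toList[s.toNat]? = some '\n') := by
          rw [hc]
          rintro (h | h)
          · exact hL h
          · exact hnl (by simpa using h)
        have hstop : pvStop context.toList s e = pvStop context.toList (s + 1) e := by
          rw [pvStop, dif_pos hse, if_neg hcond]
        have hge : s + 1 ≤ pvStop context.toList (s + 1) e := pvStop_ge _ _ _ (by omega)
        rw [if_neg hL, hget, hc]
        dsimp only
        rw [if_neg (by simp [hnl])]
        rw [ih (s + 1) s (by omega) (by omega), hstop]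
        split_ifs <;> omega

-- evaluating Python's bounded find for 0 ≤ a ≤ b ≤ len
lemma pv_findFrom_eval (cs : List Char) (a b : Int) (ha : 0 ≤ a) (hab : a ≤ b)
    (hbL : b ≤ (cs.length : Int)) :
    PySem.Chars.findFrom cs ['\n'] a (some b) =
      (if PySem.Chars.find ((cs.take b.toNat).drop a.toNat) ['\n'] = -1 then -1
       else a + PySem.Chars.find ((cs.take b.toNat).drop a.toNat) ['\n']) := by
  unfold PySem.Chars.findFrom
  dsimp only
  rw [if_neg (by omega : ¬ (cs.length : Int) < b), if_neg (by omega : ¬ b < 0),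
    if_neg (by omega : ¬ a < 0), if_neg (by omega : ¬ b < a)]

-- bounded find with a start beyond the end of the string
lemma pv_findFrom_oob (cs : List Char) (a b : Int) (ha : 0 ≤ a) (hb0 : 0 ≤ b)
    (hab : (cs.length : Int) < a) :
    PySem.Chars.findFrom cs ['\n'] a (some b) = -1 := by
  unfold PySem.Chars.findFrom
  dsimp only
  rw [if_neg (by omega : ¬ b < 0), if_neg (by omega : ¬ a < 0)]
  by_cases h : (cs.length : Int) < b
  · rw [if_pos h, if_pos (by omega : (cs.length : Int) < a)]
  · rw [if_neg h, if_pos (by omega : b < a)]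

-- Python find with equal (identically clamped) start and end bounds searches nothing
lemma pv_findFrom_self (cs : List Char) (a : Int) :
    PySem.Chars.findFrom cs ['\n'] a (some a) = -1 := by
  unfold PySem.Chars.findFrom
  dsimp only
  by_cases hn : (cs.length : Int) < a
  · rw [if_pos hn, if_neg (by omega : ¬ a < 0), if_pos hn]
  · rw [if_neg hn]
    have hempty : ∀ x : Int, PySem.Chars.find ((List.take x.toNat cs).drop x.toNat) ['\n'] = -1 := by
      intro x
      have h0 : (List.take x.toNat cs).drop x.toNat = [] :=
        List.drop_eq_nil_of_le (by simp)
      rw [h0]; decide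
    by_cases ha : a < 0
    · rw [if_pos ha, if_neg (lt_irrefl _), hempty, if_pos rfl]
    · rw [if_neg ha, if_neg (lt_irrefl _), hempty, if_pos rfl]

-- with an empty window both sides return start_index, for every start_index
lemma pv_main_trivial (s w : Int) (ctx : String) (hw : w < 1) :
    get_end_index_for_payload s w ctx = get_end_index_for_payload_alt s w ctx := by
  unfold get_end_index_for_payload get_end_index_for_payload_alt
  dsimp only
  have hL0 : 0 ≤ PySem.Str.len ctx := by rw [PySem.Str.len_eq]; positivity
  have hlim : max s (min (s + w) (PySem.Str.len ctx)) = s := by omega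
  rw [pvALoop, if_neg (by omega : ¬ s < s + w), hlim, PySem.Str.findFrom_eq,
    (by rfl : ("\n" : String).toList = ['\n']), pv_findFrom_self]
  simp only [ne_eq, not_true_eq_false, if_false]
  omega

lemma pv_main (s w : Int) (ctx : String) (hs : 0 ≤ s) :
    get_end_index_for_payload s w ctx = get_end_index_for_payload_alt s w ctx := by
  have hnl : ("\n" : String).toList = ['\n'] := rfl
  unfold get_end_index_for_payload get_end_index_for_payload_alt
  dsimp only
  simp only [PySem.Str.len_eq, PySem.Str.findFrom_eq, hnl]
  rw [pv_loop_eq_stop ctx s (s + w) s hs]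
  set cs := ctx.toList with hcs
  set L : Int := (cs.length : Int) with hLdef
  have hL0 : 0 ≤ L := by positivity
  by_cases hsL : L < s
  · -- start beyond the string: both sides return start_index
    have hlimit : max s (min (s + w) L) = s := by omega
    rw [hlimit, pv_findFrom_oob cs s s hs hs hsL]
    have hA : pvStop cs s (s + w) ≤ s := by
      by_cases hse : s < s + w
      · rw [pvStop, dif_pos hse, if_pos (Or.inl (by omega))]
      · rw [pvStop, dif_neg hse]; omega
    rw [if_pos hA]
    simp only [ne_eq, not_true_eq_false, if_false]
    omega
  · -- s ≤ L
    set limit : Int := max s (min (s + w) L) with hlimdef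
    have h1 : s ≤ limit := le_max_left _ _
    have h2 : limit ≤ L := by omega
    rw [pv_findFrom_eval cs s limit hs h1 h2]
    set seg := (cs.take limit.toNat).drop s.toNat with hsegdef
    have hseg_get : ∀ j : Nat, seg[j]? = if s.toNat + j < limit.toNat then cs[s.toNat + j]? else none := by
      intro j
      rw [hsegdef, List.getElem?_drop, List.getElem?_take]
    by_cases hr : PySem.Chars.find seg ['\n'] = -1
    · -- no newline inside the window [s, limit)
      have hnone : ∀ i : Int, s ≤ i → i < limit → ¬((L ≤ i) ∨ cs[i.toNat]? = some '\n') := by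
        intro i hi1 hi2 h
        rcases h with h | h
        · omega
        · refine (PySem.Chars.find_eq_neg_one_iff seg ['\n']).mp hr ?_
          rw [List.singleton_infix_iff]
          have hj : i.toNat = s.toNat + (i - s).toNat := by omega
          have : seg[(i - s).toNat]? = some '\n' := by
            rw [hseg_get, if_pos (by omega), ← hj, h]
          exact List.mem_of_getElem? this
      rw [if_pos hr]
      simp only [ne_eq, not_true_eq_false, if_false]
      by_cases hwe : s < s + w
      · have ht : pvStop cs s (s + w) = limit := by
          rw [pvStop_congr cs s limit (s + w) h1 (by omega) hnone]
          by_cases hl3 : limit < s + w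
          · rw [pvStop, dif_pos hl3, if_pos (Or.inl (by omega))]
          · rw [pvStop, dif_neg hl3]; omega
        rw [ht]; split_ifs <;> omega
      · have ht : pvStop cs s (s + w) = s + w := by rw [pvStop, dif_neg hwe]
        rw [ht, if_pos (by omega)]; omega
    · -- a newline is found at position p = s + r inside the window
      have hr0 : 0 ≤ PySem.Chars.find seg ['\n'] := by
        have := PySem.Chars.neg_one_le_find seg ['\n']; omega
      obtain ⟨hpre, hmin⟩ := PySem.Chars.find_spec hr0
      set r : Nat := (PySem.Chars.find seg ['\n']).toNat with hrdef
      have hhead : (seg.drop r).head? = some '\n' := (pv_singleton_prefix_iff _ _).mp hpre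
      have hget : seg[r]? = some '\n' := by rw [← List.head?_drop]; exact hhead
      have hrlim : s.toNat + r < limit.toNat := by
        by_contra hcon
        rw [hseg_get, if_neg hcon] at hget
        simp at hget
      have hpcs : cs[s.toNat + r]? = some '\n' := by
        rw [hseg_get, if_pos hrlim] at hget; exact hget
      set p : Int := s + (r : Int) with hpdef
      have hp2 : p < limit := by omega
      have hnone : ∀ i : Int, s ≤ i → i < p → ¬((L ≤ i) ∨ cs[i.toNat]? = some '\n') := by
        intro i hi1 hi2 h
        rcases h with h | h
        · omega
        · refine hmin (i - s).toNat (by omega) ?_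
          rw [pv_singleton_prefix_iff, List.head?_drop, hseg_get, if_pos (by omega)]
          have hj : s.toNat + (i - s).toNat = i.toNat := by omega
          rw [hj]; exact h
      have hlim_le : limit ≤ s + w := by omega
      have ht : pvStop cs s (s + w) = p := by
        rw [pvStop_congr cs s p (s + w) (by omega) (by omega) hnone]
        rw [pvStop, dif_pos (by omega : p < s + w), if_pos (Or.inr (by
          have : p.toNat = s.toNat + r := by omega
          rw [this]; exact hpcs))]
      rw [ht, if_neg (by omega : ¬ PySem.Chars.find seg ['\n'] = -1)]
      have hfr : PySem.Chars.find seg ['\n'] = (r : Int) := by omega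
      rw [hfr]
      split_ifs <;> omega

-- ===== VERDICT (by name: the statements are the Claim_ definitions above) =====
theorem get_end_index_for_payload_spec : Claim_equal_get_end_index_for_payload := by
  intro s w ctx _hdom hpre
  unfold Spec_get_end_index_for_payload
  rcases hpre with hs | hw
  · exact pv_main s w ctx hs
  · exact pv_main_trivial s w ctx hw
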